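-- pv_equiv track=rewrite | github.com/adkonk/sequence-analysis | pirdisorderwindow.py | reverselocationfinder
-- ===== SOURCE A (Python) =====
-- def reverselocationfinder(sequence,MSAlocation):
--     location = 0
--     for i in sequence[:MSAlocation]:
--         if i !="-":
--             location += 1
--         else:
--             continue
--     return location
-- ===== SOURCE B (Python) =====
-- def reverselocationfinder(sequence, MSAlocation):
--     # Partition the prefix at the gap characters and sum the ungapped
--     # segment lengths: every non-gap character lies in exactly one segment.
--     return sum(len(segment) for segment in sequence[:MSAlocation].split('-'))
-- ===== Notes on version B (the rewrite author's own statement) =====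
-- stated objective: alternative
-- what changed: B partitions the prefix at the gap characters with str.split('-') and sums the segment lengths, instead of scanning character by character and incrementing a counter for each non-gap.
import Mathlib
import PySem

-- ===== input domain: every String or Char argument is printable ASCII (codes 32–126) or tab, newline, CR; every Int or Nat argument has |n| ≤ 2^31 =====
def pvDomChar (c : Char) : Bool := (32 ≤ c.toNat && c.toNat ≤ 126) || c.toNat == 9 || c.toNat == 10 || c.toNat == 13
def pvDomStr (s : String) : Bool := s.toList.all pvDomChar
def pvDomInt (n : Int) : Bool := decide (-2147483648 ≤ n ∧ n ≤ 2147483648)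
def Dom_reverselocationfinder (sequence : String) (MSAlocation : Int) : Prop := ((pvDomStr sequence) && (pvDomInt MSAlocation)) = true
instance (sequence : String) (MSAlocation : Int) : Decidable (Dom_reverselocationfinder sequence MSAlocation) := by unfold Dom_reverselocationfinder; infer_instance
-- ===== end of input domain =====

-- B partitions the prefix at the gap characters and sums the segment lengths, instead of counting non-gaps one by one (objective: alternative).


-- ===== PORT A =====
-- for i in sequence[:MSAlocation]: if i != "-": location += 1
def reverselocationfinder (sequence : String) (MSAlocation : Int) : Int :=
  (PySem.Chars.slice sequence.toList none (some MSAlocation)).foldl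
    (fun location i => if i != '-' then location + 1 else location) 0

-- ===== PORT B =====
-- return sum(len(segment) for segment in sequence[:MSAlocation].split('-'))
def reverselocationfinder_alt (sequence : String) (MSAlocation : Int) : Int :=
  ((PySem.Chars.splitOn (PySem.Chars.slice sequence.toList none (some MSAlocation)) ['-']).map
    (fun segment => (segment.length : Int))).sum

-- ===== PRECONDITION & SPEC =====
def Spec_reverselocationfinder (sequence : String) (MSAlocation : Int) (out : Int) : Prop := out = reverselocationfinder_alt sequence MSAlocation
instance (sequence : String) (MSAlocation : Int) (out : Int) : Decidable (Spec_reverselocationfinder sequence MSAlocation out) := by unfold Spec_reverselocationfinder; infer_instance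

-- ===== CLAIM =====
def Claim_equal_reverselocationfinder : Prop := ∀ (sequence : String) (MSAlocation : Int), Dom_reverselocationfinder sequence MSAlocation → Spec_reverselocationfinder sequence MSAlocation (reverselocationfinder sequence MSAlocation)

-- ===== LEMMAS AND PROOFS =====

-- splitting at a single character: the segments' total length is the number of non-sep characters
lemma splitOn_go_sum (c : Char) (l cur : List Char) (acc : List (List Char)) (fuel : Nat)
    (h : l.length ≤ fuel) :
    ((PySem.Chars.splitOn.go [c] fuel l cur acc).map List.length).sum
      = (acc.map List.length).sum + cur.length + l.countP (fun i => !(i == c)) := by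
  induction l generalizing fuel cur acc with
  | nil =>
    cases fuel <;> simp [PySem.Chars.splitOn.go]
  | cons x t ih =>
    cases fuel with
    | zero => simp at h
    | succ n =>
      simp only [List.length_cons] at h
      simp only [PySem.Chars.splitOn.go, List.isPrefixOf]
      by_cases hx : c = x
      · subst hx
        simp only [BEq.rfl, Bool.and_true, List.length_singleton, List.drop_succ_cons,
          List.drop_zero, if_pos]
        rw [ih [] (cur.reverse :: acc) n (by omega)]
        simp
        omega
      · have hb : (c == x) = false := by simp [hx]
        simp only [hb, Bool.false_and, Bool.false_eq_true, if_false]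
        rw [ih (x :: cur) acc n (by omega)]
        have hp : (!(x == c)) = true := by simp [Ne.symm hx]
        simp [hp]
        omega

lemma splitOn_sum_length (l : List Char) (c : Char) :
    ((PySem.Chars.splitOn l [c]).map List.length).sum = l.countP (fun i => !(i == c)) := by
  simp [PySem.Chars.splitOn, splitOn_go_sum c l [] [] (l.length + 1) (by omega)]

-- ===== VERDICT =====
theorem reverselocationfinder_spec : Claim_equal_reverselocationfinder := by
  intro s m _
  unfold Spec_reverselocationfinder reverselocationfinder reverselocationfinder_alt
  rw [PySem.List.foldl_if_add_one]
  have hcast : ∀ parts : List (List Char),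
      (parts.map (fun segment => (segment.length : Int))).sum = ((parts.map List.length).sum : Nat) := by
    intro parts
    induction parts with
    | nil => simp
    | cons p t ih => simp [ih]
  rw [hcast, splitOn_sum_length]
  simp [bne]
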